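-- pv_equiv track=rewrite | github.com/markbodracska/voting-systems-bigdata-analysis | voting_systems.py | rank_p
-- ===== SOURCE A (Python) =====
-- def rank_p(candidates, stro_paths):
--     """
--     Calculates preference ordering from array of strongest paths.
--
--     Parameters:
--         candidates(list): list of candidates
--         stro_paths(dict): strongest paths
--     Returns:
--         winner(int): numerical id of winner candidate
--     """
--     candidate_wins = []
--
--     for candidate_name1 in candidates:
--         num_wins = 0
--
--         for candidate_name2 in candidates:
--             if candidate_name1 == candidate_name2:
--                 continue
--             candidate1_score = stro_paths.get((candidate_name1, candidate_name2), 0)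
--             candidate2_score = stro_paths.get((candidate_name2, candidate_name1), 0)
--             if candidate1_score > candidate2_score:
--                 num_wins += 1
--
--         candidate_wins.append((candidate_name1, num_wins))
--
--     candidate_wins.sort(reverse = True, key=lambda tup: tup[1])
--     winner = [cand_win[0] for cand_win in candidate_wins][0]
--
--     return winner
-- ===== SOURCE B (Python) =====
-- def rank_p(candidates, stro_paths):
--     # Compare each unordered pair of candidates once (two dict lookups per pair
--     # instead of A's four) and keep a running first-in-order argmax; no sort.
--     best, best_w = None, -1
--     rest, pending = list(candidates), [0] * len(candidates)
--     while rest: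
--         c, w = rest.pop(0), pending.pop(0)
--         new_pending = []
--         for b, p in zip(rest, pending):
--             s_cb = stro_paths.get((c, b), 0)
--             s_bc = stro_paths.get((b, c), 0)
--             if s_cb > s_bc:
--                 w += 1
--             elif s_bc > s_cb:
--                 p += 1
--             new_pending.append(p)
--         pending = new_pending
--         if w > best_w:
--             best, best_w = c, w
--     return best
-- ===== Notes on version B (the rewrite author's own statement) =====
-- stated objective: faster
-- what changed: B compares each unordered pair of candidates exactly once (two dict lookups per pair instead of A's four, crediting whichever side wins) and selects the winner with a single running first-in-order argmax instead of building a (candidate, wins) list and stable-sorting it.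
import Mathlib
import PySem

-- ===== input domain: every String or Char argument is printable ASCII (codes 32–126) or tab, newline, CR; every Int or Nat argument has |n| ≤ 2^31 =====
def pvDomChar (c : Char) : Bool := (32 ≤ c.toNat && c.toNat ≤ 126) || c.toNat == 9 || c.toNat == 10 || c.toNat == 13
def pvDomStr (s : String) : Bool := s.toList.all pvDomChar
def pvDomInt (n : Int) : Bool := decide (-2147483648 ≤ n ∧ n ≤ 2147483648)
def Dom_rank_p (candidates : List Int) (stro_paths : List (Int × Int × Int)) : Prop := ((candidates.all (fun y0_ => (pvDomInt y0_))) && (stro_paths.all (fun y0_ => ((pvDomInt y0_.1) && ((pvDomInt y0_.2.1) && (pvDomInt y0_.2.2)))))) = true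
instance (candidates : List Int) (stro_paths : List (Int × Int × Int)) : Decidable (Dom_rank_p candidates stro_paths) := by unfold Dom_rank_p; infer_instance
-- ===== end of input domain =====

-- B compares each unordered candidate pair once (half of A's dict lookups) and picks the
-- winner with a running first-in-order argmax instead of A's build-list + stable sort + index.


-- ===== PORT A =====
-- shared primitive: stro_paths.get((a, b), 0) on the association list (first match)
def sget (stro : List (Int × Int × Int)) (a b : Int) : Int :=
  match stro with
  | [] => 0
  | (x, y, v) :: rest => if x = a ∧ y = b then v else sget rest a b

def rank_p (candidates : List Int) (stro_paths : List (Int × Int × Int)) : Int :=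
  let candidate_wins := candidates.foldl (fun acc c1 =>
    let num_wins := candidates.foldl (fun n c2 =>
      if c1 = c2 then n
      else
        let candidate1_score := sget stro_paths c1 c2
        let candidate2_score := sget stro_paths c2 c1
        if candidate1_score > candidate2_score then n + 1 else n) (0 : Int)
    acc ++ [(c1, num_wins)]) []
  let sortedWins := PySem.List.sorted candidate_wins (fun tup => tup.2) true
  -- '[cand_win[0] for cand_win in candidate_wins][0]'; Pre_ guarantees nonempty (else IndexError)
  (PySem.List.pyGet? (sortedWins.map (fun (cw : Int × Int) => cw.1)) 0).getD 0

-- ===== PORT B =====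
-- inner 'for b, p in zip(rest, pending)' loop of Source B
def pairFold (stro : List (Int × Int × Int)) (c : Int) (w : Int)
    (rest pending : List Int) : Int × List Int :=
  (rest.zip pending).foldl (fun st bp =>
    let s_cb := sget stro c bp.1
    let s_bc := sget stro bp.1 c
    if s_cb > s_bc then (st.1 + 1, st.2 ++ [bp.2])
    else if s_bc > s_cb then (st.1, st.2 ++ [bp.2 + 1])
    else (st.1, st.2 ++ [bp.2])) (w, ([] : List Int))

-- the 'while rest:' loop of Source B ('best = None' initially)
def bLoop (stro : List (Int × Int × Int)) (best : Option Int) (best_w : Int) :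
    List Int → List Int → Option Int
  | [], _ => best
  | c :: rest', pending =>
      let wp := pairFold stro c (pending.headD 0) rest' pending.tail
      if wp.1 > best_w then bLoop stro (some c) wp.1 rest' wp.2
      else bLoop stro best best_w rest' wp.2

def rank_p_alt (candidates : List Int) (stro_paths : List (Int × Int × Int)) : Int :=
  -- Python returns None on empty candidates (excluded by Pre_); .getD 0 is unreachable there
  (bLoop stro_paths none (-1) candidates (List.replicate candidates.length 0)).getD 0

-- ===== PRECONDITION & SPEC =====
-- A raises IndexError on empty candidates (indexing [0] an empty list); B returns None there.
def Pre_rank_p (candidates : List Int) (stro_paths : List (Int × Int × Int)) : Prop :=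
  candidates ≠ []
instance (candidates : List Int) (stro_paths : List (Int × Int × Int)) : Decidable (Pre_rank_p candidates stro_paths) := by unfold Pre_rank_p; infer_instance
def pvWitness_rank_p : List Int × (List (Int × Int × Int)) := ([1, 2, 3], [(1, 2, 5), (2, 1, 3), (3, 1, 4)])

def Spec_rank_p (candidates : List Int) (stro_paths : List (Int × Int × Int)) (out : Int) : Prop := out = rank_p_alt candidates stro_paths
instance (candidates : List Int) (stro_paths : List (Int × Int × Int)) (out : Int) : Decidable (Spec_rank_p candidates stro_paths out) := by unfold Spec_rank_p; infer_instance

-- ===== CLAIM (what is proved, stated in full; the proofs are below) =====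
def Claim_equal_rank_p : Prop := ∀ (candidates : List Int) (stro_paths : List (Int × Int × Int)), Dom_rank_p candidates stro_paths → Pre_rank_p candidates stro_paths → Spec_rank_p candidates stro_paths (rank_p candidates stro_paths)

-- ===== LEMMAS AND PROOFS =====
def beats (stro : List (Int × Int × Int)) (a b : Int) : Bool :=
  sget stro b a < sget stro a b

theorem beats_self (stro : List (Int × Int × Int)) (a : Int) : beats stro a a = false := by
  simp [beats]

def W (stro : List (Int × Int × Int)) (cs : List Int) (a : Int) : Int :=
  (cs.countP (fun b => beats stro a b) : Int)

theorem innerA_eq_W (stro : List (Int × Int × Int)) (cs : List Int) (c1 : Int) :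
    cs.foldl (fun n c2 =>
      if c1 = c2 then n
      else
        let candidate1_score := sget stro c1 c2
        let candidate2_score := sget stro c2 c1
        if candidate1_score > candidate2_score then n + 1 else n) (0 : Int) = W stro cs c1 := by
  have h : ∀ (n : Int) (c2 : Int),
      (if c1 = c2 then n
       else
        let candidate1_score := sget stro c1 c2
        let candidate2_score := sget stro c2 c1
        if candidate1_score > candidate2_score then n + 1 else n) =
      if beats stro c1 c2 then n + 1 else n := by
    intro n c2
    by_cases hc : c1 = c2
    · subst hc; simp [beats]
    · simp only [if_neg hc, beats, decide_eq_true_eq, gt_iff_lt]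
  calc cs.foldl _ (0:Int) = cs.foldl (fun n c2 => if beats stro c1 c2 then n + 1 else n) 0 := by
        exact PySem.List.foldl_congr_mem cs _ _ 0 (fun n x _ => h n x)
    _ = W stro cs c1 := by
        rw [PySem.List.foldl_if_add_one]; simp [W]

theorem pairFold_gen (stro : List (Int × Int × Int)) (c : Int) :
    ∀ (rest pending : List Int) (w : Int) (acc : List Int),
    (rest.zip pending).foldl (fun st bp =>
      let s_cb := sget stro c bp.1
      let s_bc := sget stro bp.1 c
      if s_cb > s_bc then (st.1 + 1, st.2 ++ [bp.2])
      else if s_bc > s_cb then (st.1, st.2 ++ [bp.2 + 1])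
      else (st.1, st.2 ++ [bp.2])) (w, acc) =
    (w + ((rest.take pending.length).countP (fun b => beats stro c b) : Int),
     acc ++ (rest.zip pending).map (fun bp => if beats stro bp.1 c then bp.2 + 1 else bp.2))
  | [], pending, w, acc => by simp
  | r :: rest, [], w, acc => by simp
  | r :: rest, q :: pending, w, acc => by
    simp only [List.zip_cons_cons, List.foldl_cons, List.take_succ_cons, List.countP_cons,
      List.map_cons, List.length_cons]
    by_cases h1 : beats stro c r
    · have h2 : beats stro r c = false := by
        simp only [beats, decide_eq_true_eq, decide_eq_false_iff_not] at h1 ⊢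
        omega
      rw [if_pos (by simpa [gt_iff_lt, beats] using h1)]
      rw [pairFold_gen stro c rest pending (w+1) (acc ++ [q])]
      simp [h1, h2]
      omega
    · rw [if_neg (by simpa [gt_iff_lt, beats] using h1)]
      by_cases h2 : beats stro r c
      · rw [if_pos (by simpa [gt_iff_lt, beats] using h2)]
        rw [pairFold_gen stro c rest pending w (acc ++ [q+1])]
        simp [h1, h2]
      · rw [if_neg (by simpa [gt_iff_lt, beats] using h2)]
        rw [pairFold_gen stro c rest pending w (acc ++ [q])]
        simp [h1, h2]

theorem pairFold_spec (stro : List (Int × Int × Int)) (c : Int) (w : Int)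
    (rest : List Int) (g : Int → Int) :
    pairFold stro c w rest (rest.map g) =
      (w + (rest.countP (fun b => beats stro c b) : Int),
       rest.map (fun b => if beats stro b c then g b + 1 else g b)) := by
  unfold pairFold
  rw [pairFold_gen]
  have hz : rest.zip (rest.map g) = rest.map (fun b => (b, g b)) := by
    have := @List.zip_map' Int Int Int (fun (x : Int) => x) g rest
    simpa using this
  rw [hz, List.map_map]
  simp

theorem bLoop_spec (stro : List (Int × Int × Int)) (Wf : Int → Int) :
    ∀ (rest : List Int) (g : Int → Int) (best : Option Int) (best_w : Int),
    (∀ b ∈ rest, g b + (rest.countP (fun x => beats stro b x) : Int) = Wf b) →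
    bLoop stro best best_w rest (rest.map g) =
      (rest.foldl (fun (st : Option Int × Int) a =>
        if st.2 < Wf a then (some a, Wf a) else st) (best, best_w)).1
  | [], g, best, best_w, hg => by simp [bLoop]
  | c :: rest', g, best, best_w, hg => by
    have hw : (pairFold stro c ((g c :: rest'.map g).headD 0) rest' (g c :: rest'.map g).tail).1 = Wf c := by
      rw [show ((g c :: rest'.map g).headD 0) = g c from rfl,
          show ((g c :: rest'.map g).tail) = rest'.map g from rfl]
      rw [pairFold_spec]
      have := hg c (List.mem_cons_self ..)
      simp only [List.countP_cons, beats_self] at this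
      simpa using this
    have hp : (pairFold stro c ((g c :: rest'.map g).headD 0) rest' (g c :: rest'.map g).tail).2 =
        rest'.map (fun b => if beats stro b c then g b + 1 else g b) := by
      rw [show ((g c :: rest'.map g).headD 0) = g c from rfl,
          show ((g c :: rest'.map g).tail) = rest'.map g from rfl]
      rw [pairFold_spec]
    have hg' : ∀ b ∈ rest',
        (fun b => if beats stro b c then g b + 1 else g b) b +
          (rest'.countP (fun x => beats stro b x) : Int) = Wf b := by
      intro b hb
      have := hg b (List.mem_cons_of_mem _ hb)
      simp only [List.countP_cons] at this
      by_cases hbc : beats stro b c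
      · simp only [hbc, if_pos] at this ⊢
        push_cast at this ⊢
        omega
      · simp only [hbc] at this ⊢
        simpa using this
    show bLoop stro best best_w (c :: rest') ((c :: rest').map g) = _
    rw [List.map_cons]
    unfold bLoop
    simp only [hw, hp, List.foldl_cons, gt_iff_lt]
    by_cases hlt : best_w < Wf c
    · rw [if_pos hlt, if_pos hlt]
      exact bLoop_spec stro Wf rest' _ (some c) (Wf c) hg'
    · rw [if_neg hlt, if_neg hlt]
      exact bLoop_spec stro Wf rest' _ best best_w hg'

theorem optFold_eq (Wf : Int → Int) :
    ∀ (l : List Int) (a : Int) (wa : Int),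
    l.foldl (fun (st : Option Int × Int) c => if st.2 < Wf c then (some c, Wf c) else st)
      ((some a : Option Int), wa) =
      (some (l.foldl (fun (p : Int × Int) c => if p.2 < Wf c then (c, Wf c) else p) (a, wa)).1,
       (l.foldl (fun (p : Int × Int) c => if p.2 < Wf c then (c, Wf c) else p) (a, wa)).2)
  | [], a, wa => by simp
  | c :: l, a, wa => by
    simp only [List.foldl_cons]
    by_cases h : wa < Wf c
    · rw [if_pos h, if_pos h]
      exact optFold_eq Wf l c (Wf c)
    · rw [if_neg h, if_neg h]
      exact optFold_eq Wf l a wa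

theorem insertBy_head (key : Int × Int → Int) (x h : Int × Int) (tl : List (Int × Int)) :
    (PySem.List.insertBy (fun a b => decide (key b < key a)) x (h :: tl)).head? =
      some (if key h < key x then x else h) := by
  simp [PySem.List.insertBy]
  split_ifs <;> simp

theorem foldl_ins_head (key : Int × Int → Int) :
    ∀ (t acc : List (Int × Int)) (h : Int × Int), acc.head? = some h →
    (t.foldl (fun acc x => PySem.List.insertBy (fun a b => decide (key b < key a)) x acc) acc).head? =
      some (t.foldl (fun p q => if key p < key q then q else p) h)
  | [], acc, h, hh => by simpa using hh
  | x :: t, acc, h, hh => by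
    cases acc with
    | nil => simp at hh
    | cons a rest =>
      have ha : a = h := by simpa using hh
      subst ha
      simp only [List.foldl_cons]
      exact foldl_ins_head key t _ _ (insertBy_head key x a rest)

theorem head_sorted_rev (x : Int × Int) (t : List (Int × Int)) :
    (PySem.List.sorted (x :: t) (fun tup => tup.2) true).head? =
      some (t.foldl (fun p q => if p.2 < q.2 then q else p) x) := by
  rw [PySem.List.sorted_rev_eq_foldl_insertBy]
  simp only [List.foldl_cons]
  exact foldl_ins_head (fun tup => tup.2) t _ x (by simp [PySem.List.insertBy])

theorem rankA_char (stro : List (Int × Int × Int)) (c : Int) (cs' : List Int) :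
    rank_p (c :: cs') stro =
      (cs'.foldl (fun (p : Int × Int) a =>
        if p.2 < W stro (c :: cs') a then (a, W stro (c :: cs') a) else p)
        (c, W stro (c :: cs') c)).1 := by
  unfold rank_p
  rw [PySem.List.foldl_append_singleton_eq_map]
  simp only [List.nil_append]
  have hmap : (c :: cs').map (fun c1 => (c1, (c :: cs').foldl (fun n c2 =>
      if c1 = c2 then n
      else
        let candidate1_score := sget stro c1 c2
        let candidate2_score := sget stro c2 c1
        if candidate1_score > candidate2_score then n + 1 else n) (0 : Int))) =
      (c :: cs').map (fun c1 => (c1, W stro (c :: cs') c1)) := by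
    apply List.map_congr_left
    intro a _
    rw [innerA_eq_W]
  rw [hmap, List.map_cons]
  have hh := head_sorted_rev (c, W stro (c :: cs') c) (cs'.map (fun c1 => (c1, W stro (c :: cs') c1)))
  obtain ⟨tl, htl⟩ := List.head?_eq_some_iff.mp hh
  rw [htl, List.map_cons]
  simp only [PySem.List.pyGet?, PySem.List.pyIdx?]
  norm_num
  rw [List.foldl_map]

theorem rankB_char (stro : List (Int × Int × Int)) (c : Int) (cs' : List Int) :
    rank_p_alt (c :: cs') stro =
      (cs'.foldl (fun (p : Int × Int) a =>
        if p.2 < W stro (c :: cs') a then (a, W stro (c :: cs') a) else p)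
        (c, W stro (c :: cs') c)).1 := by
  unfold rank_p_alt
  have hrep : List.replicate (c :: cs').length (0 : Int) = (c :: cs').map (fun _ => 0) := by
    simp [List.replicate_succ]
  rw [hrep, bLoop_spec stro (W stro (c :: cs')) (c :: cs') (fun _ => 0) none (-1)
    (by intro b _; simp [W])]
  simp only [List.foldl_cons]
  have h0 : ((-1 : Int) < W stro (c :: cs') c) := by
    have : (0 : Int) ≤ W stro (c :: cs') c := by simp [W]
    omega
  rw [if_pos h0, optFold_eq]
  simp

-- ===== VERDICT (by name: the statement is the Claim_ definition above) =====
theorem rank_p_spec : Claim_equal_rank_p := by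
  intro candidates stro_paths _ hpre
  unfold Spec_rank_p
  cases candidates with
  | nil => exact absurd rfl hpre
  | cons c cs' => rw [rankA_char, rankB_char]
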